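-- pv_equiv track=rewrite | github.com/DmitryShut/Digits | modelRunner.py | closiest_28
-- ===== SOURCE A (Python) =====
-- def closiest_28(w, h):
--     i = 28
--     digit = 0
--     if w > h:
--         digit = w
--     else:
--         digit = h
--     if digit < i:
--         return i
--     while i<digit:
--         i+=i
--     return i
-- ===== SOURCE B (Python) =====
-- def closiest_28(w, h):
--     digit = max(w, h)
--     if digit < 28:
--         return 28
--     m = -(-digit // 28)          # ceil(digit / 28)
--     return 28 << (m - 1).bit_length()
-- ===== Notes on version B (the rewrite author's own statement) =====
-- stated objective: simpler
-- what changed: Replaces the doubling while-loop with a closed-form computation: digit=max(w,h), ceiling division by 28 and a bit_length shift give the smallest 28*2^k >= digit directly.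
import Mathlib
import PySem

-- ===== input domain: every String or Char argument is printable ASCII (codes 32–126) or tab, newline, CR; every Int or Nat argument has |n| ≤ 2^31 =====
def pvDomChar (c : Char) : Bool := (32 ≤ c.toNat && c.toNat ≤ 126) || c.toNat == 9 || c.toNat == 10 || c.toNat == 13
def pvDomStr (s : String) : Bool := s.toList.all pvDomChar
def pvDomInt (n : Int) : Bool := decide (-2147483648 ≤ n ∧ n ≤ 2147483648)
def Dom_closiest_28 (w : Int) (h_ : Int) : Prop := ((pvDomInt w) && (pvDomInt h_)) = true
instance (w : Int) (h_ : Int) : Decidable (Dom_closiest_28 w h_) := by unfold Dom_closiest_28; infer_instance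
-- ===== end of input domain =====

-- B replaces A's doubling while-loop by a closed form (ceiling division by 28 plus a
-- bit_length shift); equivalence is proved on all inputs (both are total).

-- ===== PORT A =====
-- the 'while i < digit: i += i' loop; the '0 < i' guard only makes the recursion total
-- (at the single call site i = 28 > 0, so the guard is always true there)
def closiest28Loop (digit : Int) (i : Int) : Int :=
  if i < digit then
    if _h : 0 < i then closiest28Loop digit (i + i) else i
  else i
termination_by (digit - i).toNat
decreasing_by omega

def closiest_28 (w : Int) (h_ : Int) : Int :=
  let i : Int := 28
  let digit : Int := if w > h_ then w else h_
  if digit < i then i else closiest28Loop digit i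

-- ===== PORT B =====
def closiest_28_alt (w : Int) (h_ : Int) : Int :=
  let digit : Int := max w h_
  if digit < 28 then 28
  else
    let m : Int := -(PySem.Int.floordiv (-digit) 28)   -- ceil(digit / 28)
    28 * 2 ^ PySem.Int.bitLength (m - 1)               -- 28 << (m-1).bit_length()

-- ===== PRECONDITION & SPEC =====
def Spec_closiest_28 (w : Int) (h_ : Int) (out : Int) : Prop := out = closiest_28_alt w h_
instance (w : Int) (h_ : Int) (out : Int) : Decidable (Spec_closiest_28 w h_ out) := by unfold Spec_closiest_28; infer_instance

-- ===== CLAIM (what is proved, stated in full; the proofs are below) =====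
def Claim_equal_closiest_28 : Prop := ∀ (w : Int) (h_ : Int), Dom_closiest_28 w h_ → Spec_closiest_28 w h_ (closiest_28 w h_)

-- ===== LEMMAS AND PROOFS =====

-- A's loop from a positive start returns i·2^k for the least k with digit ≤ i·2^k
theorem closiest28Loop_char (digit i : Int) (hi : 0 < i) :
    ∃ k : Nat, closiest28Loop digit i = i * 2 ^ k ∧ digit ≤ i * 2 ^ k ∧
      (k = 0 ∨ i * 2 ^ (k - 1) < digit) := by
  by_cases h : i < digit
  · have hrec : closiest28Loop digit i = closiest28Loop digit (i + i) := by
      rw [closiest28Loop]; simp [h, hi]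
    obtain ⟨k', h1, h2, h3⟩ := closiest28Loop_char digit (i + i) (by omega)
    refine ⟨k' + 1, ?_, ?_, ?_⟩
    · rw [hrec, h1]; ring
    · calc digit ≤ (i + i) * 2 ^ k' := h2
        _ = i * 2 ^ (k' + 1) := by ring
    · right
      have hkk : k' + 1 - 1 = k' := rfl
      rw [hkk]
      by_cases hk0 : k' = 0
      · subst hk0; simpa using h
      · have hlt : (i + i) * 2 ^ (k' - 1) < digit := by tauto
        have hk : k' - 1 + 1 = k' := by omega
        have heq : i * 2 ^ k' = (i + i) * 2 ^ (k' - 1) := by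
          calc i * 2 ^ k' = i * 2 ^ (k' - 1 + 1) := by rw [hk]
            _ = (i + i) * 2 ^ (k' - 1) := by ring
        omega
  · refine ⟨0, ?_, by simpa using not_lt.mp h, Or.inl rfl⟩
    rw [closiest28Loop]; simp [h]
termination_by (digit - i).toNat
decreasing_by omega

theorem pow_mono_two (a b : Nat) (h : a ≤ b) : (2 : Int) ^ a ≤ 2 ^ b :=
  pow_le_pow_right₀ (by norm_num) h

-- least k with digit ≤ 28·2^k is unique
theorem closiest28_uniq (digit : Int) (k b : Nat)
    (hk1 : digit ≤ 28 * 2 ^ k) (hk2 : k = 0 ∨ (28 : Int) * 2 ^ (k - 1) < digit)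
    (hb1 : digit ≤ 28 * 2 ^ b) (hb2 : b = 0 ∨ (28 : Int) * 2 ^ (b - 1) < digit) : k = b := by
  rcases lt_trichotomy k b with hlt | heq | hgt
  · rcases hb2 with h0 | h
    · omega
    · have := pow_mono_two k (b - 1) (by omega)
      omega
  · exact heq
  · rcases hk2 with h0 | h
    · omega
    · have := pow_mono_two b (k - 1) (by omega)
      omega

theorem closiest_28_eq (w h_ : Int) : closiest_28 w h_ = closiest_28_alt w h_ := by
  unfold closiest_28 closiest_28_alt
  have hdig : (if w > h_ then w else h_) = max w h_ := by
    rw [max_def]; split_ifs <;> omega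
  rw [hdig]
  set digit := max w h_ with hd
  by_cases hlt : digit < 28
  · simp [hlt]
  · simp only [hlt, if_false]
    have hge : (28 : Int) ≤ digit := not_lt.mp hlt
    set m : Int := -(PySem.Int.floordiv (-digit) 28) with hm
    have hbr : (m - 1) * 28 < digit ∧ digit ≤ m * 28 :=
      (PySem.Int.neg_floordiv_neg_eq_iff_of_pos (by norm_num : (0:Int) < 28)).mp hm.symm
    have hm1 : 1 ≤ m := by nlinarith [hbr.1, hbr.2]
    -- B's exponent
    set b := PySem.Int.bitLength (m - 1) with hb
    obtain ⟨k, h1, h2, h3⟩ := closiest28Loop_char digit 28 (by norm_num)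
    have hub : digit ≤ 28 * 2 ^ b := by
      have h1' : (m - 1).natAbs < 2 ^ b := PySem.Int.lt_two_pow_bitLength (m - 1)
      have habs : (m - 1).natAbs = (m - 1) := Int.natAbs_of_nonneg (by omega)
      have : (m : Int) - 1 < (2 : Int) ^ b := by
        calc (m : Int) - 1 = ((m - 1).natAbs : Int) := habs.symm
          _ < ((2 ^ b : Nat) : Int) := by exact_mod_cast h1'
          _ = (2 : Int) ^ b := by push_cast; ring
      nlinarith [hbr.2]
    have hlb : b = 0 ∨ (28 : Int) * 2 ^ (b - 1) < digit := by
      by_cases hb0 : b = 0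
      · exact Or.inl hb0
      · right
        have hmne : m - 1 ≠ 0 := by
          intro h0
          rw [hb, h0] at hb0
          exact hb0 PySem.Int.bitLength_zero
        have h2' : 2 ^ (b - 1) ≤ (m - 1).natAbs := PySem.Int.two_pow_bitLength_le (m - 1) hmne
        have habs : ((m - 1).natAbs : Int) = m - 1 := Int.natAbs_of_nonneg (by omega)
        have : (2 : Int) ^ (b - 1) ≤ m - 1 := by
          calc (2 : Int) ^ (b - 1) = ((2 ^ (b - 1) : Nat) : Int) := by push_cast; ring
            _ ≤ ((m - 1).natAbs : Int) := by exact_mod_cast h2'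
            _ = m - 1 := habs
        nlinarith [hbr.1]
    have hkb : k = b := closiest28_uniq digit k b h2 h3 hub hlb
    rw [h1, hkb]

-- ===== VERDICT (by name: the statement is the Claim_ definition above) =====
theorem closiest_28_spec : Claim_equal_closiest_28 := by
  intro w h_ _
  unfold Spec_closiest_28
  exact closiest_28_eq w h_
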